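-- pv_equiv track=rewrite | github.com/JoaoRicardoAL/Algoritmos-Avan-ados | Exercicios/14/E14.py | solve
-- ===== SOURCE A (Python) =====
-- def solve(s):
--     if not s:
--         return ""
--     n = len(s)
--     if n == 0:
--         return ""
--
--     lps = [0]*n
--     length = 0
--     i = 1
--
--     while i < n:
--         if s[i] == s[length]:
--             length += 1
--             lps[i] = length
--             i += 1
--         else:
--             if length != 0:
--                 length = lps[length-1]
--             else:
--                 lps[i] = 0
--                 i += 1
--     tam = lps[-1]
--     return s[:tam]
-- ===== SOURCE B (Python) =====
-- def solve(s):
--     n = len(s)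
--     for L in range(n - 1, 0, -1):
--         if s[:L] == s[n - L:]:
--             return s[:L]
--     return ""
-- ===== Notes on version B (the rewrite author's own statement) =====
-- stated objective: simpler
-- what changed: Replaces the KMP failure-function (lps array) construction with a direct descending search: try each candidate length L from n-1 down to 1 and return the first prefix that equals the corresponding suffix.
import Mathlib
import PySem

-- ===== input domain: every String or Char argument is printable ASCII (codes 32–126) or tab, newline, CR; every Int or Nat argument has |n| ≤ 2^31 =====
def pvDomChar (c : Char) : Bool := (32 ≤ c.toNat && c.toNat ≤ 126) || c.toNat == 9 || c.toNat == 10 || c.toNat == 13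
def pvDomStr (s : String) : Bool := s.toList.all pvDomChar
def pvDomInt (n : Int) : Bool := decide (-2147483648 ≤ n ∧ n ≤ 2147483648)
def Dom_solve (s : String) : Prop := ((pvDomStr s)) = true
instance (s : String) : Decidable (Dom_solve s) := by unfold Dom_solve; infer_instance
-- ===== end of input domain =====

-- B replaces A's KMP failure-function construction by a direct descending search for the
-- longest proper prefix that is also a suffix (objective: simpler; not claimed faster).

-- ===== PORT A =====
-- KMP while-loop of A, step for step; `fuel` is only a totality guard (the loop makes at
-- most 2*n steps, proved below), every step is exactly one iteration of A's while-loop.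
def kmpLoop (l : List Char) (n : Nat) : List Nat → Nat → Nat → Nat → List Nat
  | lps, _, _, 0 => lps
  | lps, len, i, fuel+1 =>
    if i < n then
      if l.getD i ' ' = l.getD len ' ' then
        kmpLoop l n (lps.set i (len+1)) (len+1) (i+1) fuel
      else if len ≠ 0 then
        kmpLoop l n lps (lps.getD (len-1) 0) i fuel
      else
        kmpLoop l n (lps.set i 0) 0 (i+1) fuel
    else lps

def solve (s : String) : String :=
  if s.toList = [] then "" else
    let l := s.toList
    let n := l.length
    if n = 0 then "" else
      let lps := kmpLoop l n (List.replicate n 0) 0 1 (2*n)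
      String.mk (l.take (lps.getD (n-1) 0))   -- tam = lps[-1]; return s[:tam]

-- ===== PORT B =====
-- descending loop `for L in range(n-1, 0, -1): if s[:L] == s[n-L:]: return s[:L]`
def altLoop (l : List Char) (n : Nat) : Nat → Nat
  | 0 => 0
  | L+1 => if l.take (L+1) = l.drop (n - (L+1)) then L+1 else altLoop l n L

def solve_alt (s : String) : String :=
  let l := s.toList
  String.mk (l.take (altLoop l l.length (l.length - 1)))

-- ===== PRECONDITION & SPEC =====
def Spec_solve (s : String) (out : String) : Prop := out = solve_alt s
instance (s : String) (out : String) : Decidable (Spec_solve s out) := by unfold Spec_solve; infer_instance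

-- ===== CLAIM (what is proved, stated in full; the proofs are below) =====
def Claim_equal_solve : Prop := ∀ (s : String), Dom_solve s → Spec_solve s (solve s)

-- ===== LEMMAS AND PROOFS =====

-- `isB t k` : the length-k prefix of t equals its length-k suffix ("k is a border width").
def isB (t : List Char) (k : Nat) : Prop := t.take k = t.drop (t.length - k)

theorem isB_zero (t : List Char) : isB t 0 := by simp [isB]

-- altLoop returns the greatest L ≤ start satisfying the prefix=suffix test (0 if none).
theorem altLoop_spec (l : List Char) (n start : Nat) :
    altLoop l n start ≤ start ∧
    (altLoop l n start = 0 ∨ l.take (altLoop l n start) = l.drop (n - altLoop l n start)) ∧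
    (∀ b, b ≤ start → l.take b = l.drop (n - b) → b ≤ altLoop l n start) := by
  induction start with
  | zero => refine ⟨le_refl _, Or.inl rfl, ?_⟩; intro b hb _; omega
  | succ L ih =>
    by_cases h : l.take (L+1) = l.drop (n - (L+1))
    · refine ⟨?_, ?_, ?_⟩ <;> simp [altLoop, h]
      intro b hb _; omega
    · obtain ⟨h1, h2, h3⟩ := ih
      refine ⟨?_, ?_, ?_⟩ <;> simp [altLoop, h]
      · omega
      · exact h2
      · intro b hb hP
        rcases Nat.lt_or_ge b (L+1) with hb' | hb'
        · exact h3 b (by omega) hP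
        · exact absurd (by rw [show L+1 = b by omega]; exact hP) h

-- the longest proper border width of t (B's search, as a spec value)
def MB (t : List Char) : Nat := altLoop t t.length (t.length - 1)

theorem MB_le (t : List Char) : MB t ≤ t.length - 1 := (altLoop_spec t t.length (t.length - 1)).1

theorem MB_isB (t : List Char) : isB t (MB t) := by
  rcases (altLoop_spec t t.length (t.length - 1)).2.1 with h | h
  · rw [MB, h]; exact isB_zero t
  · exact h

theorem MB_max (t : List Char) (b : Nat) (hb : b ≤ t.length - 1) (hP : isB t b) : b ≤ MB t :=
  (altLoop_spec t t.length (t.length - 1)).2.2 b hb hP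

theorem MB_unique (t : List Char) (v : Nat) (hv : v ≤ t.length - 1) (hP : isB t v)
    (hmax : ∀ b, b ≤ t.length - 1 → isB t b → b ≤ v) : MB t = v :=
  le_antisymm (hmax _ (MB_le t) (MB_isB t)) (MB_max t v hv hP)

theorem MB_single (t : List Char) (h : t.length = 1) : MB t = 0 := by
  rw [MB, h]; rfl

-- nested borders: if a and b are borders of t with b ≤ a then b is a border of t.take a
theorem isB_take (t : List Char) (a b : Nat) (ha : a ≤ t.length) (hb : b ≤ a)
    (hPa : isB t a) (hPb : isB t b) : isB (t.take a) b := by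
  unfold isB at *
  rw [List.take_take, Nat.min_eq_left hb, List.length_take, Nat.min_eq_left ha,
      hPa, List.drop_drop, hPb]
  congr 1; omega

-- a border of a border is a border
theorem isB_of_isB_take (t : List Char) (a b : Nat) (ha : a ≤ t.length) (hb : b ≤ a)
    (hPa : isB t a) (hPb : isB (t.take a) b) : isB t b := by
  unfold isB at *
  rw [List.take_take, Nat.min_eq_left hb, List.length_take, Nat.min_eq_left ha, hPa,
      List.drop_drop] at hPb
  rw [hPb]; congr 1; omega

-- extending a border by one character
theorem isB_ext (t : List Char) (c : Char) (b : Nat) (hb : b < t.length) :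
    isB (t ++ [c]) (b+1) ↔ (isB t b ∧ t.getD b ' ' = c) := by
  unfold isB
  have h1 : (t ++ [c]).take (b+1) = t.take b ++ [t.getD b ' '] := by
    rw [List.take_append_of_le_length (by omega)]
    rw [List.getD_eq_getElem t ' ' hb]
    simpa using (List.take_concat_get (l := t) (n := b)).symm
  have h2 : (t ++ [c]).drop ((t ++ [c]).length - (b+1)) = t.drop (t.length - b) ++ [c] := by
    rw [List.length_append, List.drop_append_of_le_length (by simp)]
    congr 2
    simp only [List.length_singleton]
    omega
  rw [h1, h2]
  constructor
  · intro h; exact List.append_singleton_inj.mp h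
  · intro ⟨h3, h4⟩; rw [h3, h4]

theorem getD_take (l : List Char) (i j : Nat) (h : j < i) :
    (l.take i).getD j ' ' = l.getD j ' ' := by
  simp [List.getD, h]

theorem take_succ_eq (l : List Char) (i : Nat) (h : i < l.length) :
    l.take (i+1) = l.take i ++ [l.getD i ' '] := by
  rw [List.getD_eq_getElem l ' ' h]
  simpa using (List.take_concat_get (l := l) (n := i)).symm

theorem length_take_eq (l : List Char) (i : Nat) (h : i ≤ l.length) :
    (l.take i).length = i := by simp; omega

-- main invariant lemma for A's while-loop
theorem kmp_main (l : List Char) : ∀ (fuel : Nat) (lps : List Nat) (len i : Nat),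
    1 ≤ i → i ≤ l.length → len < i →
    isB (l.take i) len →
    (∀ j, j < i → lps.getD j 0 = MB (l.take (j+1))) →
    lps.length = l.length →
    (∀ b, b < i → isB (l.take i) b → len < b → l.getD b ' ' ≠ l.getD i ' ') →
    2*(l.length - i) + len + 1 ≤ fuel →
    ∀ j, j < l.length → (kmpLoop l l.length lps len i fuel).getD j 0 = MB (l.take (j+1)) := by
  intro fuel
  induction fuel with
  | zero => intro lps len i _ _ _ _ _ _ _ hfuel; omega
  | succ fuel ih =>
    intro lps len i hi1 hin hlen hP hlps hlpslen hrej hfuel j hj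
    by_cases hiN : i < l.length
    · have htlen : (l.take i).length = i := length_take_eq l i (le_of_lt hiN)
      have hstep : l.take (i+1) = l.take i ++ [l.getD i ' '] := take_succ_eq l i hiN
      have htlen1 : (l.take (i+1)).length = i+1 := length_take_eq l (i+1) (by omega)
      by_cases hc : l.getD i ' ' = l.getD len ' '
      · -- match: lps[i] := len+1
        rw [show kmpLoop l l.length lps len i (fuel+1)
              = kmpLoop l l.length (lps.set i (len+1)) (len+1) (i+1) fuel by
            simp only [kmpLoop]; rw [if_pos hiN, if_pos hc]]
        have hnew : MB (l.take (i+1)) = len+1 := by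
          apply MB_unique
          · omega
          · rw [hstep]
            refine (isB_ext (l.take i) _ len (by omega)).mpr ⟨hP, ?_⟩
            rw [getD_take l i len hlen]; exact hc.symm
          · intro b hb hPb
            rw [htlen1] at hb
            match b with
            | 0 => omega
            | b'+1 =>
              rw [hstep] at hPb
              obtain ⟨hPb', hcb⟩ := (isB_ext (l.take i) _ b' (by omega)).mp hPb
              by_contra hgt
              have hbl : len < b' := by omega
              apply hrej b' (by omega) hPb' hbl
              rwa [getD_take l i b' (by omega)] at hcb
        apply ih (lps.set i (len+1)) (len+1) (i+1) (by omega) (by omega) (by omega)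
          (hnew ▸ MB_isB (l.take (i+1)))
          ?_ (by simp [hlpslen]) ?_ (by omega) j hj
        · intro j' hj'
          by_cases hji : j' = i
          · subst hji
            rw [List.getD_eq_getElem?_getD, List.getElem?_set_self (by omega)]
            simpa using hnew.symm
          · rw [List.getD_eq_getElem?_getD, List.getElem?_set_ne (by omega),
                ← List.getD_eq_getElem?_getD]
            exact hlps j' (by omega)
        · intro b hb hPb hgt
          exfalso
          have := MB_max (l.take (i+1)) b (by omega) hPb
          omega
      · by_cases hz : len ≠ 0
        · -- mismatch, len ≠ 0: len := lps[len-1]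
          rw [show kmpLoop l l.length lps len i (fuel+1)
                = kmpLoop l l.length lps (lps.getD (len-1) 0) i fuel by
              simp only [kmpLoop]; rw [if_pos hiN, if_neg hc, if_pos hz]]
          have hulen : (l.take len).length = len := length_take_eq l len (by omega)
          have htu : (l.take i).take len = l.take len := by
            rw [List.take_take, Nat.min_eq_left (by omega)]
          have hlen' : lps.getD (len-1) 0 = MB (l.take len) := by
            have := hlps (len-1) (by omega)
            rwa [show len-1+1 = len by omega] at this
          have hMBle : MB (l.take len) ≤ len - 1 := by
            have := MB_le (l.take len); omega
          apply ih lps (lps.getD (len-1) 0) i hi1 hin (by omega) ?_ hlps hlpslen ?_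
            (by omega) j hj
          · rw [hlen']
            exact isB_of_isB_take (l.take i) len (MB (l.take len)) (by omega) (by omega)
              hP (htu ▸ MB_isB (l.take len))
          · intro b hb hPb hgt
            rcases lt_trichotomy b len with hbl | hbl | hbl
            · exfalso
              have hub : isB (l.take len) b := by
                have := isB_take (l.take i) len b (by omega) (by omega) hP hPb
                rwa [htu] at this
              have := MB_max (l.take len) b (by omega) hub
              omega
            · subst hbl
              exact fun hEq => hc hEq.symm
            · exact hrej b hb hPb hbl
        · -- mismatch, len = 0: lps[i] := 0
          have hz0 : len = 0 := by omega
          subst hz0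
          rw [show kmpLoop l l.length lps 0 i (fuel+1)
                = kmpLoop l l.length (lps.set i 0) 0 (i+1) fuel by
              simp only [kmpLoop]; rw [if_pos hiN, if_neg hc, if_neg hz]]
          have hnew : MB (l.take (i+1)) = 0 := by
            apply MB_unique
            · omega
            · exact isB_zero _
            · intro b hb hPb
              rw [htlen1] at hb
              match b with
              | 0 => omega
              | b'+1 =>
                exfalso
                rw [hstep] at hPb
                obtain ⟨hPb', hcb⟩ := (isB_ext (l.take i) _ b' (by omega)).mp hPb
                rw [getD_take l i b' (by omega)] at hcb
                rcases Nat.eq_zero_or_pos b' with h0 | h0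
                · subst h0; exact hc hcb.symm
                · exact hrej b' (by omega) hPb' (by omega) hcb
          apply ih (lps.set i 0) 0 (i+1) (by omega) (by omega) (by omega)
            (hnew ▸ MB_isB (l.take (i+1)))
            ?_ (by simp [hlpslen]) ?_ (by omega) j hj
          · intro j' hj'
            by_cases hji : j' = i
            · subst hji
              rw [List.getD_eq_getElem?_getD, List.getElem?_set_self (by omega)]
              simpa using hnew.symm
            · rw [List.getD_eq_getElem?_getD, List.getElem?_set_ne (by omega),
                  ← List.getD_eq_getElem?_getD]
              exact hlps j' (by omega)
          · intro b hb hPb hgt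
            exfalso
            have := MB_max (l.take (i+1)) b (by omega) hPb
            omega
    · have hi : i = l.length := by omega
      rw [show kmpLoop l l.length lps len i (fuel+1) = lps by
        simp only [kmpLoop]; rw [if_neg hiN]]
      exact hlps j (by omega)

theorem solve_eq (s : String) : solve s = solve_alt s := by
  by_cases h : s.toList = []
  · simp only [solve, solve_alt, h, if_pos, List.length_nil, List.take_nil]
    rfl
  · have hn : 1 ≤ s.toList.length := by
      cases hL : s.toList with
      | nil => exact absurd hL h
      | cons a as => simp
    have hmain := kmp_main s.toList (2 * s.toList.length)
      (List.replicate s.toList.length 0) 0 1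
      le_rfl hn Nat.zero_lt_one (isB_zero _)
      (fun j hj => by
        have hj0 : j = 0 := by omega
        subst hj0
        rw [List.getD_eq_getElem?_getD, List.getElem?_replicate_of_lt (by omega)]
        simp [MB_single (s.toList.take 1) (length_take_eq s.toList 1 hn)])
      (by simp)
      (fun b hb _ hgt => by omega)
      (by omega)
      (s.toList.length - 1) (by omega)
    rw [show s.toList.length - 1 + 1 = s.toList.length by omega, List.take_length] at hmain
    simp only [solve, solve_alt, if_neg h, if_neg (by omega : ¬ s.toList.length = 0)]
    rw [hmain, MB]

-- ===== VERDICT (by name: the statement is the Claim_ definition above) =====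
theorem solve_spec : Claim_equal_solve := by
  intro s _
  unfold Spec_solve
  exact solve_eq s
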